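-- pv_equiv track=rewrite | github.com/chriskalos/CardMaster | Game/TemporaryFunctions.py | ai
-- ===== SOURCE A (Python) =====
-- def ai(totalMana, handSize, hand=[], currentSelection=[]):
--     # Base case: If totalMana or handSize is 0, return the currentSelection
--     if totalMana == 0 or handSize == 0:
--         return currentSelection
--
--     # If the last card in the hand has the same value as totalMana,
--     # add it to the currentSelection and return the updated currentSelection
--     if hand[handSize - 1] == totalMana:
--         currentSelection.append(hand[handSize - 1])
--         return currentSelection
--
--     # If the last card in the hand is greater than totalMana,
--     # recursively call the ai function with handSize - 1
--     elif hand[handSize - 1] > totalMana: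
--         return ai(totalMana, handSize - 1, hand, currentSelection)
--
--     # If the last card in the hand is less than totalMana,
--     # add it to the currentSelection and recursively call the ai function
--     # with totalMana - hand[handSize - 1] and handSize - 1
--     else:
--         currentSelection.append(hand[handSize - 1])
--         return ai(totalMana - hand[handSize - 1], handSize - 1, hand, currentSelection)
-- ===== SOURCE B (Python) =====
-- def ai(totalMana, handSize, hand=[], currentSelection=[]):
--     # Same return value as A on the stated domain; like A, mutates and
--     # returns the shared currentSelection list.
--     tm = totalMana
--     for card in reversed(hand[:handSize]):
--         if tm == 0:
--             break
--         if card <= tm: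
--             currentSelection.append(card)
--             tm -= card
--     return currentSelection
-- ===== Notes on version B (the rewrite author's own statement) =====
-- stated objective: simpler
-- what changed: Replaces the four-way recursive descent threading totalMana/handSize through calls by a single pass over the reversed prefix hand[:handSize] with one running remainder (the ==/< branches collapse into one 'card <= tm' case), no recursion and no index bookkeeping.
-- outside the precondition, e.g. on ai(7, 9, [1, 2], []): A raises IndexError, B returns [2, 1]; on ai(3, -1, [1, 2, 3], []): A returns [2, 1], B returns [2, 1]
import Mathlib
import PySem

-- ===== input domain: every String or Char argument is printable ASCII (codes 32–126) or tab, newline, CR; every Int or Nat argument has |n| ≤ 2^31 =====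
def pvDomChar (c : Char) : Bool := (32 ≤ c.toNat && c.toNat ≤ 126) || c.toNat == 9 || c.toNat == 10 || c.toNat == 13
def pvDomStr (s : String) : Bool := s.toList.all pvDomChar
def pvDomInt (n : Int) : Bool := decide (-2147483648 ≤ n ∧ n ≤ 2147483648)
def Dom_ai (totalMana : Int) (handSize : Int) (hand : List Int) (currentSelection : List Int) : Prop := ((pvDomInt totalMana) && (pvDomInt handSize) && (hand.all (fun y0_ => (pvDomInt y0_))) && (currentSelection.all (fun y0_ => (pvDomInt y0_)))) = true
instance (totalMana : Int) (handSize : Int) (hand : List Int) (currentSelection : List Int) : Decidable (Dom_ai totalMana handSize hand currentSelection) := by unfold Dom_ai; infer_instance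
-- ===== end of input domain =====

-- B replaces A's recursive descent by one pass over the reversed prefix; equivalence is about
-- the RETURN value only (in Python both A and B mutate the shared currentSelection argument).

-- ===== PORT A =====
def ai (totalMana : Int) (handSize : Int) (hand : List Int) (currentSelection : List Int) : List Int :=
  if totalMana = 0 ∨ handSize = 0 then currentSelection
  else if handSize < 0 then currentSelection  -- totality guard only; such inputs are excluded by Pre_ai
  else match PySem.List.pyGet? hand (handSize - 1) with
    | none => currentSelection  -- IndexError in Python; excluded by Pre_ai
    | some card =>
      if card = totalMana then currentSelection ++ [card]
      else if card > totalMana then ai totalMana (handSize - 1) hand currentSelection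
      else ai (totalMana - card) (handSize - 1) hand (currentSelection ++ [card])
termination_by handSize.toNat
decreasing_by all_goals omega

-- ===== PORT B =====
-- the for-loop of Source B over `reversed(hand[:handSize])` with its break and running remainder tm
def aiAltGo (tm : Int) (cards : List Int) (acc : List Int) : List Int :=
  match cards with
  | [] => acc
  | card :: rest =>
    if tm = 0 then acc
    else if card ≤ tm then aiAltGo (tm - card) rest (acc ++ [card])
    else aiAltGo tm rest acc

def ai_alt (totalMana : Int) (handSize : Int) (hand : List Int) (currentSelection : List Int) : List Int :=
  aiAltGo totalMana (PySem.List.slice hand none (some handSize)).reverse currentSelection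

-- ===== PRECONDITION & SPEC =====
-- Pre_ excludes the inputs where A raises IndexError (handSize beyond the hand with totalMana ≠ 0)
-- and negative handSize, where A's behaviour (return or IndexError) is an accident of Python's
-- negative-index wraparound during the recursion.
def Pre_ai (totalMana : Int) (handSize : Int) (hand : List Int) (currentSelection : List Int) : Prop :=
  totalMana = 0 ∨ handSize = 0 ∨ (0 ≤ handSize ∧ handSize ≤ hand.length)
instance (totalMana : Int) (handSize : Int) (hand : List Int) (currentSelection : List Int) : Decidable (Pre_ai totalMana handSize hand currentSelection) := by unfold Pre_ai; infer_instance
def pvWitness_ai : Int × Int × List Int × List Int := (3, 2, [2, 1], [])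
def Spec_ai (totalMana : Int) (handSize : Int) (hand : List Int) (currentSelection : List Int) (out : List Int) : Prop := out = ai_alt totalMana handSize hand currentSelection
instance (totalMana : Int) (handSize : Int) (hand : List Int) (currentSelection : List Int) (out : List Int) : Decidable (Spec_ai totalMana handSize hand currentSelection out) := by unfold Spec_ai; infer_instance

-- ===== CLAIM (what is proved, stated in full; the proofs are below) =====
def Claim_equal_ai : Prop := ∀ (totalMana : Int) (handSize : Int) (hand : List Int) (currentSelection : List Int), Dom_ai totalMana handSize hand currentSelection → Pre_ai totalMana handSize hand currentSelection → Spec_ai totalMana handSize hand currentSelection (ai totalMana handSize hand currentSelection)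

-- ===== LEMMAS AND PROOFS =====

lemma aiAltGo_zero (l acc : List Int) : aiAltGo 0 l acc = acc := by
  cases l <;> simp [aiAltGo]

lemma ai_eq_go (n : Nat) : ∀ (tm hs : Int) (hand cs : List Int),
    0 ≤ hs → hs ≤ hand.length → hs.toNat = n →
    ai tm hs hand cs = aiAltGo tm ((hand.take hs.toNat).reverse) cs := by
  induction n with
  | zero =>
    intro tm hs hand cs h0 _ hn
    have : hs = 0 := by omega
    subst this
    simp [ai, aiAltGo]
  | succ n ih =>
    intro tm hs hand cs h0 hlen hn
    have hpos : 1 ≤ hs := by omega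
    have hnlt : n < hand.length := by omega
    rw [ai]
    have hget : PySem.List.pyGet? hand (hs - 1) = some (hand[n]'hnlt) := by
      have := PySem.List.pyGet?_eq_some_getElem (xs := hand) (i := hs - 1)
        (by omega) (by omega)
      have hidx : (hs - 1).toNat = n := by omega
      simpa [hidx] using this
    have htake : (hand.take hs.toNat).reverse = hand[n]'hnlt :: (hand.take n).reverse := by
      rw [hn, List.take_succ, List.getElem?_eq_getElem hnlt]
      simp
    rw [htake]
    by_cases htm : tm = 0
    · subst htm; simp [aiAltGo]
    · simp only [htm, false_or]
      have hhs0 : ¬ hs = 0 := by omega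
      have hhsneg : ¬ hs < 0 := by omega
      simp only [hhs0, if_false, hhsneg, hget]
      set card := hand[n]'hnlt with hcard
      by_cases heq : card = tm
      · rw [if_pos heq, aiAltGo]
        simp [htm, heq, aiAltGo_zero]
      · simp only [if_neg heq]
        by_cases hgt : card > tm
        · simp only [if_pos hgt]
          rw [ih tm (hs - 1) hand cs (by omega) (by omega) (by omega)]
          rw [aiAltGo]
          have : ¬ card ≤ tm := by omega
          simp only [htm, if_false, this]
          have : (hs - 1).toNat = n := by omega
          rw [this]
        · simp only [if_neg hgt]
          rw [ih (tm - card) (hs - 1) hand (cs ++ [card]) (by omega) (by omega) (by omega)]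
          rw [aiAltGo]
          have hle : card ≤ tm := by omega
          simp only [htm, if_false, if_pos hle]
          have : (hs - 1).toNat = n := by omega
          rw [this]

-- ===== VERDICT (by name: the statement is the Claim_ definition above) =====
theorem ai_spec : Claim_equal_ai := by
  intro tm hs hand cs _ hpre
  unfold Spec_ai ai_alt
  rcases hpre with h | h | ⟨h0, hlen⟩
  · subst h
    rw [aiAltGo_zero]
    rw [ai]; simp
  · subst h
    rw [ai]; simp [PySem.List.slice_to hand (by omega : (0:Int) ≤ 0), aiAltGo]
  · rw [PySem.List.slice_to hand h0]
    exact ai_eq_go hs.toNat tm hs hand cs h0 hlen rfl
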